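-- pv_equiv track=rewrite | github.com/yeahzxnn/CodingTest | 프로그래머스/2/60057. 문자열 압축/문자열 압축.py | solution
-- ===== SOURCE A (Python) =====
-- def solution(s):
--
--     #길이가 1이면?
--     if len(s) == 1:
--         return 1
--
--     results = []
--
--     #for문은 배열 처음 문자와 같은 문자가 발견되면 멈춤.
--     for step in range(1,len(s)//2 + 1):
--         compressed = ""
--         prev = s[0:step]
--         count = 1
--
--         for j in range(step,len(s),step):
--             curr = s[j:j+step]
--
--             if prev == curr:
--                 count += 1
--             else:
--                 compressed += (str(count)+prev) if count >= 2 else prev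
--                 prev = curr
--                 count = 1
--
--         compressed += (str(count)+prev) if count >= 2 else prev
--         results.append(len(compressed))
--
--     #가장 최소값 출력
--     return min(results)
-- ===== SOURCE B (Python) =====
-- def solution(s):
--     n = len(s)
--     bs = s.encode()
--     totals = []
--     for k in range(1, n // 2 + 1):
--         m = (n + k - 1) // k  # number of blocks
--         codes = [int.from_bytes(bs[i:i + k], 'big') for i in range(0, n, k)]
--         cuts = [0] + [i for i in range(1, m) if codes[i] != codes[i - 1]] + [m]
--         totals.append(sum(len(str(b - a)) for a, b in zip(cuts, cuts[1:]) if b - a >= 2)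
--                       + (len(cuts) - 2) * k + (n - (m - 1) * k))
--     return min(totals) if totals else n
-- ===== Notes on version B (the rewrite author's own statement) =====
-- stated objective: alternative
-- what changed: B encodes each block as an exact big-endian integer fingerprint (int.from_bytes of the byte slice) and tests block equality by integer comparison instead of comparing substrings against a carried prev block; run boundaries are collected as a list of cut positions and the compressed length is computed arithmetically from the gaps between consecutive cuts, instead of A's streaming (compressed, prev, count) accumulator that builds the compressed string and measures it.
import Mathlib
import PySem

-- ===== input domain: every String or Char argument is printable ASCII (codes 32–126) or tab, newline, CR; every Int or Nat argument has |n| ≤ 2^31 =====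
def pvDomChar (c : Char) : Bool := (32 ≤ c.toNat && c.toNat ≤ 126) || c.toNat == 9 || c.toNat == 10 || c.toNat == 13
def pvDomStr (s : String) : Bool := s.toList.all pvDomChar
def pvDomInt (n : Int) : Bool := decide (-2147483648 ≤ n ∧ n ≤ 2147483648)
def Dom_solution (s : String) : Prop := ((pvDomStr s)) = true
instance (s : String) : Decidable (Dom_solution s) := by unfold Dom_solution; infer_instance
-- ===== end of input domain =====

-- B tests block equality by comparing exact big-endian integer fingerprints of the blocks
-- (int.from_bytes of the byte slice) and computes each compressed length from the list of run
-- cut positions and their gaps, instead of A's streaming (compressed, prev, count) string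
-- building with substring comparisons (objective: alternative).

-- ===== PORT A =====
-- compressed += (str(count)+prev) if count >= 2 else prev
def pvFlushA (count : Int) (prev : List Char) : List Char :=
  if 2 ≤ count then PySem.Int.toChars count ++ prev else prev

-- the body of A's inner 'for j in range(step, len(s), step)' loop; state (compressed, prev, count)
def pvBodyA (cs : List Char) (step : Int) (st : List Char × List Char × Int) (j : Int) :
    List Char × List Char × Int :=
  let curr := PySem.List.slice cs (some j) (some (j + step))
  if st.2.1 = curr then (st.1, st.2.1, st.2.2 + 1)
  else (st.1 ++ pvFlushA st.2.2 st.2.1, curr, 1)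

-- one iteration of A's outer loop: the value appended to results for this step
def pvInnerA (cs : List Char) (step : Int) : Int :=
  let st := (PySem.List.pyRange step (cs.length : Int) step).foldl (pvBodyA cs step)
      (([] : List Char), PySem.List.slice cs (some 0) (some step), (1 : Int))
  ((st.1 ++ pvFlushA st.2.2 st.2.1).length : Int)

def solution (s : String) : Int :=
  let cs := s.toList
  if (cs.length : Int) = 1 then 1
  else
    let results := (PySem.List.pyRange 1 (PySem.Int.floordiv (cs.length : Int) 2 + 1) 1).map
      (pvInnerA cs)
    -- min(results); Python raises ValueError on an empty list, excluded by Pre_solution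
    (PySem.List.min? results id).getD 0

-- ===== PORT B =====
-- bs = s.encode(): the byte values; exact on the printable-ASCII/tab/newline/CR domain Dom_,
-- where UTF-8 encodes every character as its single code byte
def pvBytes (cs : List Char) : List Int := cs.map (fun c => (c.toNat : Int))

-- int.from_bytes(b, 'big')
def pvFromBytes (l : List Int) : Int := l.foldl (fun a x => a * 256 + x) 0

-- one iteration of B's outer loop: the compressed length for block size k
def pvTotalB (bs : List Int) (n k : Int) : Int :=
  let m := PySem.Int.floordiv (n + k - 1) k
  let codes := (PySem.List.pyRange 0 n k).map
    (fun i => pvFromBytes (PySem.List.slice bs (some i) (some (i + k))))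
  let cuts := [(0 : Int)] ++ (PySem.List.pyRange 1 m 1).filter
      (fun i => decide (¬ (PySem.List.pyGet? codes i).getD 0 =
        (PySem.List.pyGet? codes (i - 1)).getD 0)) ++ [m]
  (((cuts.zip (PySem.List.slice cuts (some 1) none)).filter
      (fun p => decide (2 ≤ p.2 - p.1))).map
      (fun p => ((PySem.Int.toChars (p.2 - p.1)).length : Int))).sum
    + ((cuts.length : Int) - 2) * k + (n - (m - 1) * k)

def solution_alt (s : String) : Int :=
  let cs := s.toList
  let n : Int := (cs.length : Int)
  let bs := pvBytes cs
  let totals := (PySem.List.pyRange 1 (PySem.Int.floordiv n 2 + 1) 1).map (pvTotalB bs n)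
  if totals.isEmpty then n else (PySem.List.min? totals id).getD 0

-- ===== PRECONDITION & SPEC =====
-- Pre_ excludes only the empty string, on which A raises ValueError (min of an empty list).
def Pre_solution (s : String) : Prop := s ≠ ""
instance (s : String) : Decidable (Pre_solution s) := by unfold Pre_solution; infer_instance
def pvWitness_solution : String := "aabbaccc"

def Spec_solution (s : String) (out : Int) : Prop := out = solution_alt s
instance (s : String) (out : Int) : Decidable (Spec_solution s out) := by
  unfold Spec_solution; infer_instance

-- ===== CLAIM (what is proved, stated in full; the proofs are below) =====
def Claim_equal_solution : Prop :=
  ∀ (s : String), Dom_solution s → Pre_solution s → Spec_solution s (solution s)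
-- ===== LEMMAS AND PROOFS =====

-- ---- proof-side abstraction of A's inner loop: the (totalLength, count) accumulator ----

-- len(str(run)) if run >= 2 else 0
def pvDigitsB (run : Int) : Int :=
  if 2 ≤ run then ((PySem.Int.toChars run).length : Int) else 0

-- accumulator body over block indices, comparing slices (state (total, run))
def pvBodyAcc (cs : List Char) (step : Int) (st : Int × Int) (j : Int) : Int × Int :=
  if PySem.List.slice cs (some j) (some (j + step)) =
      PySem.List.slice cs (some (j - step)) (some j) then (st.1, st.2 + 1)
  else (st.1 + step + pvDigitsB st.2, 1)

def pvAccLen (cs : List Char) (step : Int) : Int :=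
  let n : Int := (cs.length : Int)
  let st := (PySem.List.pyRange step n step).foldl (pvBodyAcc cs step) ((0 : Int), (1 : Int))
  let tail := n - PySem.Int.floordiv (n - 1) step * step
  st.1 + tail + pvDigitsB st.2

lemma pvSliceLen (cs : List Char) (a step : Int) (h0 : 0 ≤ a - step) (hs : 0 < step)
    (hlt : a ≤ (cs.length : Int)) :
    ((PySem.List.slice cs (some (a - step)) (some a)).length : Int) = step := by
  rw [PySem.List.length_slice]
  simp only [PySem.List.clampIdx]
  rw [if_neg (by omega), if_neg (by omega)]
  omega

-- abstraction of A's loop state that the accumulator tracks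
def pvAbs (st : List Char × List Char × Int) : Int × Int := ((st.1.length : Int), st.2.2)

-- the loop invariant: the accumulator fold tracks (length of A's compressed, A's count), and
-- A's prev is always the slice just before the next index to be processed
lemma pvLoop (cs : List Char) (step : Int) (hstep : 0 < step) :
    ∀ (k : Nat) (a : Int) (comp prev : List Char) (cnt : Int),
      0 ≤ a - step →
      a + step * (k : Int) < (cs.length : Int) + step →
      prev = PySem.List.slice cs (some (a - step)) (some a) →
      ((List.range k).map (fun i : Nat => a + step * (i : Int))).foldl (pvBodyAcc cs step)
          (pvAbs (comp, prev, cnt)) =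
        pvAbs (((List.range k).map (fun i : Nat => a + step * (i : Int))).foldl (pvBodyA cs step)
          (comp, prev, cnt)) ∧
        (((List.range k).map (fun i : Nat => a + step * (i : Int))).foldl (pvBodyA cs step)
            (comp, prev, cnt)).2.1 =
          PySem.List.slice cs (some (a + step * (k : Int) - step)) (some (a + step * (k : Int))) := by
  intro k
  induction k with
  | zero =>
    intro a comp prev cnt h0 hb hprev
    refine ⟨rfl, ?_⟩
    rw [hprev]; norm_num
  | succ k ih =>
    intro a comp prev cnt h0 hb hprev
    have hk0 : 0 ≤ step * (k : Int) := mul_nonneg hstep.le (Int.natCast_nonneg k)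
    have ha : a < (cs.length : Int) := by push_cast at hb; nlinarith [hb, hk0]
    have hmap : (List.range (k + 1)).map (fun i : Nat => a + step * (i : Int)) =
        a :: (List.range k).map (fun i : Nat => (a + step) + step * (i : Int)) := by
      rw [List.range_succ_eq_map, List.map_cons, List.map_map]
      refine congrArg₂ List.cons (by norm_num) ?_
      refine List.map_congr_left fun i _ => ?_
      simp only [Function.comp_apply]
      push_cast; ring
    rw [hmap, List.foldl_cons, List.foldl_cons]
    have hcurr : PySem.List.slice cs (some a) (some (a + step)) =
        PySem.List.slice cs (some ((a + step) - step)) (some (a + step)) := by norm_num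
    have hb' : (a + step) + step * (k : Int) < (cs.length : Int) + step := by
      push_cast at hb; linarith [hb]
    have hcast : (a + step) + step * (k : Int) = a + step * ((k + 1 : Nat) : Int) := by
      push_cast; ring
    by_cases heq : prev = PySem.List.slice cs (some a) (some (a + step))
    · have hB : PySem.List.slice cs (some a) (some (a + step)) =
          PySem.List.slice cs (some (a - step)) (some a) := by rw [← hprev, heq]
      rw [show pvBodyA cs step (comp, prev, cnt) a = (comp, prev, cnt + 1) by
            simp [pvBodyA, heq],
          show pvBodyAcc cs step (pvAbs (comp, prev, cnt)) a = pvAbs (comp, prev, cnt + 1) by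
            simp [pvBodyAcc, pvAbs, hB]]
      obtain ⟨hf, hp⟩ := ih (a + step) comp prev (cnt + 1) (by omega) hb' (by rw [heq, hcurr])
      refine ⟨hf, ?_⟩
      rw [hp, hcast]
    · have hB : ¬ (PySem.List.slice cs (some a) (some (a + step)) =
          PySem.List.slice cs (some (a - step)) (some a)) := by
        rw [← hprev]; exact fun h => heq h.symm
      have hlen : pvAbs (comp ++ pvFlushA cnt prev,
            PySem.List.slice cs (some a) (some (a + step)), 1) =
          ((comp.length : Int) + step + pvDigitsB cnt, 1) := by
        have hp : ((prev.length : Nat) : Int) = step := by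
          rw [hprev]; exact pvSliceLen cs a step h0 hstep ha.le
        unfold pvAbs pvFlushA pvDigitsB
        by_cases h2 : 2 ≤ cnt <;> simp [h2, List.length_append] <;> omega
      rw [show pvBodyA cs step (comp, prev, cnt) a =
            (comp ++ pvFlushA cnt prev, PySem.List.slice cs (some a) (some (a + step)), 1) by
            simp [pvBodyA, heq],
          show pvBodyAcc cs step (pvAbs (comp, prev, cnt)) a =
            ((comp.length : Int) + step + pvDigitsB cnt, 1) by simp [pvBodyAcc, pvAbs, hB]]
      rw [← hlen]
      obtain ⟨hf, hp⟩ := ih (a + step) (comp ++ pvFlushA cnt prev)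
        (PySem.List.slice cs (some a) (some (a + step))) 1 (by omega) hb' hcurr
      refine ⟨hf, ?_⟩
      rw [hp, hcast]

-- per-step agreement: A's appended length equals the accumulator's arithmetic length
lemma pvInner_eq (cs : List Char) (step : Int) (hstep : 0 < step)
    (hle : 2 * step ≤ (cs.length : Int)) :
    pvInnerA cs step = pvAccLen cs step := by
  have hlt : step < (cs.length : Int) := by linarith
  set K : Nat := (((cs.length : Int) - 1) / step).toNat with hKdef
  have hKv : (K : Int) = ((cs.length : Int) - 1) / step := by
    rw [hKdef]; exact Int.toNat_of_nonneg (Int.ediv_nonneg (by linarith) hstep.le)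
  have hdm := Int.mul_ediv_add_emod ((cs.length : Int) - 1) step
  have hm0 := Int.emod_nonneg ((cs.length : Int) - 1) (ne_of_gt hstep)
  have hml := Int.emod_lt_of_pos ((cs.length : Int) - 1) hstep
  have hKle : step * (K : Int) ≤ (cs.length : Int) - 1 := by rw [hKv]; linarith [hdm, hm0]
  have hKgt : (cs.length : Int) - 1 < step * (K : Int) + step := by rw [hKv]; linarith [hdm, hml]
  have hK0 : 0 ≤ step * (K : Int) := mul_nonneg hstep.le (Int.natCast_nonneg _)
  have hnum : (cs.length : Int) - step + step - 1 = (cs.length : Int) - 1 := by ring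
  have hK : PySem.List.pyRange step (cs.length : Int) step =
      (List.range K).map (fun i : Nat => step + step * (i : Int)) := by
    rw [PySem.List.pyRange_of_pos step (cs.length : Int) hstep, if_pos hlt, hnum, hKdef]
  obtain ⟨hfold, hprev⟩ := pvLoop cs step hstep K step
    ([] : List Char) (PySem.List.slice cs (some 0) (some step)) 1 (by linarith)
    (by linarith) (by norm_num)
  simp only [pvInnerA, pvAccLen]
  rw [hK]
  simp only [pvAbs, List.length_nil, Nat.cast_zero] at hfold
  rw [hfold]
  set stA := ((List.range K).map (fun i : Nat => step + step * (i : Int))).foldl (pvBodyA cs step)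
    (([] : List Char), PySem.List.slice cs (some 0) (some step), (1 : Int)) with hstA
  have hcm : (K : Int) * step = step * (K : Int) := mul_comm _ _
  have htail : ((stA.2.1.length : Nat) : Int) =
      (cs.length : Int) - PySem.Int.floordiv ((cs.length : Int) - 1) step * step := by
    rw [hprev, PySem.List.length_slice, PySem.Int.floordiv_eq_ediv_of_pos hstep, ← hKv, hcm]
    simp only [PySem.List.clampIdx]
    rw [if_neg (by omega), if_neg (by omega)]
    omega
  rw [PySem.Int.floordiv_eq_ediv_of_pos hstep, ← hKv, hcm] at htail ⊢
  unfold pvFlushA pvDigitsB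
  by_cases h2 : 2 ≤ stA.2.2 <;> simp [h2, List.length_append] <;> omega

lemma pvNe_toList {s : String} (h : s ≠ "") : s.toList ≠ [] := by
  intro hl
  exact h (by exact String.ext (by simpa using hl))

-- ---- the base-256 value of a block, and the prefix-code list ----

def pvValFrom (a : Int) (l : List Char) : Int :=
  l.foldl (fun a c => a * 256 + (c.toNat : Int)) a

def pvVal (l : List Char) : Int := pvValFrom 0 l

lemma pvValFrom_cons (a : Int) (c : Char) (l : List Char) :
    pvValFrom a (c :: l) = pvValFrom (a * 256 + (c.toNat : Int)) l := rfl

lemma pvValFrom_split (a : Int) (l : List Char) :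
    pvValFrom a l = a * 256 ^ l.length + pvVal l := by
  induction l generalizing a with
  | nil => simp [pvValFrom, pvVal]
  | cons c l ih =>
    rw [pvValFrom_cons, ih, show pvVal (c :: l) = pvValFrom ((c.toNat : Int)) l from by
      simp [pvVal, pvValFrom], ih (c.toNat : Int)]
    simp [List.length_cons, pow_succ]
    ring

lemma pvVal_nonneg (l : List Char) : 0 ≤ pvVal l := by
  induction l with
  | nil => simp [pvVal, pvValFrom]
  | cons c l ih =>
    have h : pvVal (c :: l) = pvValFrom ((c.toNat : Int)) l := by simp [pvVal, pvValFrom]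
    rw [h, pvValFrom_split]
    have : (0 : Int) ≤ (c.toNat : Int) * 256 ^ l.length := by positivity
    omega

lemma pvVal_ub (l : List Char) (hdom : ∀ c ∈ l, c.toNat ≤ 255) :
    pvVal l < 256 ^ l.length := by
  induction l with
  | nil => simp [pvVal, pvValFrom]
  | cons c l ih =>
    have h : pvVal (c :: l) = pvValFrom ((c.toNat : Int)) l := by simp [pvVal, pvValFrom]
    rw [h, pvValFrom_split]
    have hc : (c.toNat : Int) ≤ 255 := by exact_mod_cast hdom c (List.mem_cons_self)
    have h1 : pvVal l < 256 ^ l.length := ih fun d hd => hdom d (List.mem_cons_of_mem c hd)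
    have h2 : (c.toNat : Int) * 256 ^ l.length ≤ 255 * 256 ^ l.length := by
      have : (0 : Int) < 256 ^ l.length := by positivity
      nlinarith
    rw [List.length_cons, pow_succ]
    nlinarith [h1, h2]

lemma pvVal_bounds (l : List Char) (hdom : ∀ c ∈ l, 1 ≤ c.toNat ∧ c.toNat ≤ 255)
    (hne : l ≠ []) : 256 ^ (l.length - 1) ≤ pvVal l ∧ pvVal l < 256 ^ l.length := by
  refine ⟨?_, pvVal_ub l fun c hc => (hdom c hc).2⟩
  obtain ⟨c, r, rfl⟩ := List.exists_cons_of_ne_nil hne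
  have h : pvVal (c :: r) = pvValFrom ((c.toNat : Int)) r := by simp [pvVal, pvValFrom]
  rw [h, pvValFrom_split]
  have hc : (1 : Int) ≤ (c.toNat : Int) := by
    exact_mod_cast (hdom c (List.mem_cons_self)).1
  have h0 : (0 : Int) < 256 ^ r.length := by positivity
  have := pvVal_nonneg r
  simp only [List.length_cons, Nat.add_sub_cancel]
  nlinarith

lemma pvVal_inj (l1 l2 : List Char)
    (h1 : ∀ c ∈ l1, 1 ≤ c.toNat ∧ c.toNat ≤ 255)
    (h2 : ∀ c ∈ l2, 1 ≤ c.toNat ∧ c.toNat ≤ 255)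
    (h : pvVal l1 = pvVal l2) : l1 = l2 := by
  induction l1 generalizing l2 with
  | nil =>
    by_contra hne
    have hne2 : l2 ≠ [] := fun h2 => hne (by rw [h2])
    have hb := pvVal_bounds l2 h2 hne2
    have h0 : (0 : Int) < 256 ^ (l2.length - 1) := by positivity
    have : pvVal ([] : List Char) = 0 := by simp [pvVal, pvValFrom]
    omega
  | cons c r1 ih =>
    cases l2 with
    | nil =>
      exfalso
      have hb := pvVal_bounds (c :: r1) h1 (by simp)
      have h0 : (0 : Int) < 256 ^ ((c :: r1).length - 1) := by positivity
      have : pvVal ([] : List Char) = 0 := by simp [pvVal, pvValFrom]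
      omega
    | cons d r2 =>
      -- lengths agree
      have hlen : r1.length = r2.length := by
        by_contra hne
        have hb1 := pvVal_bounds (c :: r1) h1 (by simp)
        have hb2 := pvVal_bounds (d :: r2) h2 (by simp)
        simp only [List.length_cons, Nat.add_sub_cancel] at hb1 hb2
        rcases Nat.lt_or_ge r1.length r2.length with hlt | hge
        · have : (256 : Int) ^ (r1.length + 1) ≤ 256 ^ r2.length :=
            pow_le_pow_right₀ (by norm_num) hlt
          omega
        · have hlt2 : r2.length < r1.length := by omega
          have : (256 : Int) ^ (r2.length + 1) ≤ 256 ^ r1.length :=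
            pow_le_pow_right₀ (by norm_num) hlt2
          omega
      have e1 : pvVal (c :: r1) = (c.toNat : Int) * 256 ^ r1.length + pvVal r1 := by
        rw [show pvVal (c :: r1) = pvValFrom ((c.toNat : Int)) r1 from by
          simp [pvVal, pvValFrom], pvValFrom_split]
      have e2 : pvVal (d :: r2) = (d.toNat : Int) * 256 ^ r2.length + pvVal r2 := by
        rw [show pvVal (d :: r2) = pvValFrom ((d.toNat : Int)) r2 from by
          simp [pvVal, pvValFrom], pvValFrom_split]
      have hub1 : pvVal r1 < 256 ^ r1.length :=
        pvVal_ub r1 fun x hx => (h1 x (List.mem_cons_of_mem c hx)).2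
      have hub2 : pvVal r2 < 256 ^ r2.length :=
        pvVal_ub r2 fun x hx => (h2 x (List.mem_cons_of_mem d hx)).2
      have hn1 := pvVal_nonneg r1
      have hn2 := pvVal_nonneg r2
      rw [e1, e2, hlen] at h
      rw [hlen] at hub1
      have h0 : (0 : Int) < 256 ^ r2.length := by positivity
      have hcd : (c.toNat : Int) = (d.toNat : Int) := by
        rcases lt_trichotomy ((c.toNat : Int)) ((d.toNat : Int)) with hlt | heq | hgt
        · exfalso
          have hd1 : (1 : Int) ≤ (d.toNat : Int) - (c.toNat : Int) := by omega
          have : ((d.toNat : Int) - (c.toNat : Int)) * 256 ^ r2.length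
              = pvVal r1 - pvVal r2 := by linarith [h]
          nlinarith [this, hd1, hub1, hn2, h0]
        · exact heq
        · exfalso
          have hd1 : (1 : Int) ≤ (c.toNat : Int) - (d.toNat : Int) := by omega
          have : ((c.toNat : Int) - (d.toNat : Int)) * 256 ^ r2.length
              = pvVal r2 - pvVal r1 := by linarith [h]
          nlinarith [this, hd1, hub2, hn1, h0]
      have hcd' : c = d := by
        have hh : c.toNat = d.toNat := by exact_mod_cast hcd
        exact Char.ext (UInt32.toNat_inj.mp hh)
      have hv : pvVal r1 = pvVal r2 := by
        rw [hcd] at h; omega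
      rw [hcd', ih r2 (fun x hx => h1 x (List.mem_cons_of_mem c hx))
        (fun x hx => h2 x (List.mem_cons_of_mem d hx)) hv]

-- a byte-list slice is the mapped char slice
lemma pvSliceBytes (cs : List Char) (a b : Int) :
    PySem.List.slice (pvBytes cs) (some a) (some b) =
      ((PySem.List.slice cs (some a) (some b)).map (fun c => (c.toNat : Int))) := by
  simp [pvBytes, PySem.List.slice, PySem.List.clampIdx, List.map_take, List.map_drop]

-- the fingerprint of a block is its base-256 value
lemma pvFromBytes_val (l : List Char) :
    pvFromBytes (l.map (fun c => (c.toNat : Int))) = pvVal l := by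
  simp [pvFromBytes, pvVal, pvValFrom, List.foldl_map]

-- ---- the boolean run structure ----

def pvStepQ (k : Int) (st : Int × Int) (b : Bool) : Int × Int :=
  if b then (st.1, st.2 + 1) else (st.1 + k + pvDigitsB st.2, 1)

def pvRuns : List Bool → List Int
  | [] => [1]
  | true :: qs => match pvRuns qs with
    | [] => [1]
    | r :: rs => (r + 1) :: rs
  | false :: qs => 1 :: pvRuns qs

lemma pvRuns_ne_nil (q : List Bool) : pvRuns q ≠ [] := by
  match q with
  | [] => simp [pvRuns]
  | true :: qs =>
    cases h : pvRuns qs <;> simp [pvRuns, h]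
  | false :: qs => simp [pvRuns]

lemma pvFoldQ (k : Int) (q : List Bool) :
    ∀ (t c : Int),
      (q.foldl (pvStepQ k) (t, c)).1 + pvDigitsB (q.foldl (pvStepQ k) (t, c)).2 =
        t + pvDigitsB (c - 1 + (pvRuns q).headI) +
          ((pvRuns q).tail.map (fun r => pvDigitsB r + k)).sum := by
  induction q with
  | nil =>
    intro t c
    simp only [List.foldl_nil, pvRuns, List.headI, List.tail, List.map_nil, List.sum_nil]
    rw [show c - 1 + 1 = c from by ring]
    ring
  | cons b qs ih =>
    intro t c
    cases b with
    | true =>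
      rw [show (true :: qs).foldl (pvStepQ k) (t, c) = qs.foldl (pvStepQ k) (t, c + 1) from by
        simp [pvStepQ], ih t (c + 1)]
      obtain ⟨r, rs, hr⟩ := List.exists_cons_of_ne_nil (pvRuns_ne_nil qs)
      rw [show pvRuns (true :: qs) = (r + 1) :: rs from by simp [pvRuns, hr], hr]
      simp only [List.headI, List.tail]
      rw [show c + 1 - 1 + r = c - 1 + (r + 1) from by ring]
    | false =>
      rw [show (false :: qs).foldl (pvStepQ k) (t, c) =
          qs.foldl (pvStepQ k) (t + k + pvDigitsB c, 1) from by simp [pvStepQ],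
        ih (t + k + pvDigitsB c) 1,
        show pvRuns (false :: qs) = 1 :: pvRuns qs from by simp [pvRuns]]
      obtain ⟨r, rs, hr⟩ := List.exists_cons_of_ne_nil (pvRuns_ne_nil qs)
      rw [hr]
      simp only [List.headI, List.tail, List.map_cons, List.sum_cons]
      rw [show (1 : Int) - 1 + r = r from by ring, show c - 1 + 1 = c from by ring]
      ring

def pvPos : List Bool → Int → List Int
  | [], _ => []
  | b :: qs, a => if b then pvPos qs (a + 1) else a :: pvPos qs (a + 1)

def pvGaps (l : List Int) : List Int := (l.zip l.tail).map (fun p => p.2 - p.1)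

lemma pvGaps_runs (q : List Bool) : ∀ (a : Int),
    pvGaps (a :: (pvPos q (a + 1) ++ [a + 1 + (q.length : Int)])) = pvRuns q := by
  induction q with
  | nil =>
    intro a
    simp [pvPos, pvGaps, pvRuns]
  | cons b qs ih =>
    intro a
    have hlen : ((b :: qs).length : Int) = (qs.length : Int) + 1 := by
      push_cast [List.length_cons]; ring
    cases b with
    | false =>
      have hpos : pvPos (false :: qs) (a + 1) = (a + 1) :: pvPos qs (a + 1 + 1) := by
        simp [pvPos]
      rw [hpos, hlen, show a + 1 + ((qs.length : Int) + 1) = (a + 1) + 1 + (qs.length : Int)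
        from by ring]
      have hg : ∀ (x y : Int) (l : List Int), pvGaps (x :: y :: l) = (y - x) :: pvGaps (y :: l) := by
        intro x y l; simp [pvGaps]
      rw [List.cons_append, hg, ih (a + 1)]
      rw [show a + 1 - a = 1 from by ring, show pvRuns (false :: qs) = 1 :: pvRuns qs from by
        simp [pvRuns]]
    | true =>
      have hpos : pvPos (true :: qs) (a + 1) = pvPos qs (a + 1 + 1) := by simp [pvPos]
      have hend : a + 1 + (((true :: qs).length : Int)) = (a + 1) + 1 + (qs.length : Int) := by
        push_cast [List.length_cons]; ring
      rw [hpos, hend]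
      have hibase := ih (a + 1)
      -- the inner list is nonempty
      cases hL : pvPos qs (a + 1 + 1) ++ [(a + 1) + 1 + (qs.length : Int)] with
      | nil => exact absurd hL (by simp)
      | cons x L' =>
        rw [hL] at hibase
        have hg : ∀ (x y : Int) (l : List Int), pvGaps (x :: y :: l) = (y - x) :: pvGaps (y :: l) := by
          intro x y l; simp [pvGaps]
        rw [hg] at hibase ⊢
        obtain ⟨r, rs, hr⟩ := List.exists_cons_of_ne_nil (pvRuns_ne_nil qs)
        rw [hr] at hibase
        have h1 : x - (a + 1) = r := (List.cons.injEq _ _ _ _).mp hibase |>.1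
        have h2 : pvGaps (x :: L') = rs := (List.cons.injEq _ _ _ _).mp hibase |>.2
        rw [h2, show x - a = r + 1 from by omega,
          show pvRuns (true :: qs) = (r + 1) :: rs from by simp [pvRuns, hr]]

lemma pvFilter_pos (c : Int → Bool) (q : List Bool) : ∀ (a : Int),
    (∀ t (h : t < q.length), c (a + t) = !q[t]) →
    (PySem.List.pyRange a (a + (q.length : Int)) 1).filter c = pvPos q a := by
  induction q with
  | nil =>
    intro a _
    rw [show a + ((List.length ([] : List Bool)) : Int) = a from by simp,
      PySem.List.pyRange_one_eq_nil le_rfl]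
    simp [pvPos]
  | cons b qs ih =>
    intro a hc
    have hlt : a < a + (((b :: qs).length : Int)) := by
      have h0 : (0 : Int) < ((b :: qs).length : Int) := by exact_mod_cast Nat.succ_pos qs.length
      omega
    rw [PySem.List.pyRange_one_cons hlt]
    have hend : a + (((b :: qs).length : Int)) = (a + 1) + ((qs.length : Int)) := by
      rw [List.length_cons]; push_cast; ring
    have hca : c a = !b := by
      have := hc 0 (by simp)
      simpa using this
    have hrest : (PySem.List.pyRange (a + 1) ((a + 1) + ((qs.length : Int))) 1).filter c =
        pvPos qs (a + 1) := by
      refine ih (a + 1) fun t ht => ?_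
      have := hc (t + 1) (by simpa using Nat.succ_lt_succ ht)
      rw [show a + ((t + 1 : Nat) : Int) = a + 1 + (t : Int) from by push_cast; ring] at this
      simpa using this
    cases b with
    | true =>
      rw [show pvPos (true :: qs) a = pvPos qs (a + 1) from by simp [pvPos], ← hrest, ← hend]
      simp [hca]
    | false =>
      rw [show pvPos (false :: qs) a = a :: pvPos qs (a + 1) from by simp [pvPos], ← hrest, ← hend]
      simp [hca]

-- ---- the bridge: B's per-step total equals the accumulator's ----

def pvBlk (cs : List Char) (k : Int) (t : Nat) : List Char :=
  PySem.List.slice cs (some (k * t)) (some (k * t + k))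

def pvQ (cs : List Char) (k : Int) (K : Nat) : List Bool :=
  (List.range K).map (fun t => decide (pvBlk cs k (t + 1) = pvBlk cs k t))

-- summing str-lengths over the filtered gaps is summing pvDigitsB over all gaps
lemma pvSumDigits (l : List (Int × Int)) :
    (((l.filter (fun p => decide (2 ≤ p.2 - p.1))).map
        (fun p => ((PySem.Int.toChars (p.2 - p.1)).length : Int))).sum) =
      (l.map (fun p => pvDigitsB (p.2 - p.1))).sum := by
  induction l with
  | nil => simp
  | cons p l ih =>
    by_cases h : (2 : Int) ≤ p.2 - p.1 <;>
      simp [h, pvDigitsB, ih]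

lemma pvTotalB_eq (cs : List Char)
    (hdom : ∀ c ∈ cs, 1 ≤ c.toNat ∧ c.toNat ≤ 255) (k : Int) (hk : 0 < k)
    (hle : 2 * k ≤ (cs.length : Int)) :
    pvTotalB (pvBytes cs) (cs.length : Int) k = pvAccLen cs k := by
  set n : Int := (cs.length : Int) with hn
  have hn2 : 2 ≤ n := by omega
  set K : Nat := ((n - 1) / k).toNat with hKdef
  have hKv : (K : Int) = (n - 1) / k := Int.toNat_of_nonneg (Int.ediv_nonneg (by omega) hk.le)
  have hdm := Int.mul_ediv_add_emod (n - 1) k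
  have hm0 := Int.emod_nonneg (n - 1) (ne_of_gt hk)
  have hml := Int.emod_lt_of_pos (n - 1) hk
  have hKle : k * (K : Int) ≤ n - 1 := by rw [hKv]; linarith
  have hKgt : n - 1 < k * (K : Int) + k := by rw [hKv]; linarith
  set q : List Bool := pvQ cs k K with hq
  have hqlen : q.length = K := by simp [hq, pvQ]
  have hqget : ∀ t (h : t < K), q[t]'(by omega) = decide (pvBlk cs k (t + 1) = pvBlk cs k t) := by
    intro t h
    simp [hq, pvQ]
  -- ---- A side: the accumulator fold is the boolean fold ----
  have hArange : PySem.List.pyRange k n k =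
      (List.range K).map (fun i : Nat => k + k * (i : Int)) := by
    rw [PySem.List.pyRange_of_pos k n hk, if_pos (by omega : k < n),
      show n - k + k - 1 = n - 1 from by ring, hKdef]
  have hAfun : (fun (st : Int × Int) (t : Nat) => pvBodyAcc cs k st (k + k * (t : Int))) =
      (fun (st : Int × Int) (t : Nat) =>
        pvStepQ k st (decide (pvBlk cs k (t + 1) = pvBlk cs k t))) := by
    funext st t
    have hs1 : PySem.List.slice cs (some (k + k * (t : Int))) (some (k + k * (t : Int) + k)) =
        pvBlk cs k (t + 1) := by
      simp only [pvBlk]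
      congr 2 <;> push_cast <;> ring
    have hs2 : PySem.List.slice cs (some (k + k * (t : Int) - k)) (some (k + k * (t : Int))) =
        pvBlk cs k t := by
      simp only [pvBlk]
      congr 2 <;> ring
    simp only [pvBodyAcc, pvStepQ, hs1, hs2]
    by_cases hcond : pvBlk cs k (t + 1) = pvBlk cs k t <;> simp [hcond]
  have hAfold : (PySem.List.pyRange k n k).foldl (pvBodyAcc cs k) ((0 : Int), (1 : Int)) =
      q.foldl (pvStepQ k) ((0 : Int), (1 : Int)) := by
    rw [hArange, List.foldl_map, hq, pvQ, List.foldl_map, hAfun]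
  -- ---- the boolean fold in terms of runs ----
  obtain ⟨h0, tl, hruns⟩ := List.exists_cons_of_ne_nil (pvRuns_ne_nil q)
  have hFQ := pvFoldQ k q 0 1
  rw [hruns] at hFQ
  simp only [List.headI, List.tail] at hFQ
  rw [show (1 : Int) - 1 + h0 = h0 from by ring] at hFQ
  have hA : pvAccLen cs k = pvDigitsB h0 + (tl.map (fun r => pvDigitsB r + k)).sum +
      (n - (K : Int) * k) := by
    simp only [pvAccLen, ← hn, hAfold]
    rw [PySem.Int.floordiv_eq_ediv_of_pos hk, ← hKv]
    omega
  -- ---- B side ----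
  have hM : PySem.Int.floordiv (n + k - 1) k = (K : Int) + 1 := by
    rw [PySem.Int.floordiv_eq_ediv_of_pos hk,
      show n + k - 1 = (n - 1) + 1 * k from by ring, Int.add_mul_ediv_right _ _ (ne_of_gt hk),
      ← hKv]
  have hBrange : PySem.List.pyRange 0 n k =
      (List.range (K + 1)).map (fun i : Nat => 0 + k * (i : Int)) := by
    rw [PySem.List.pyRange_of_pos 0 n hk, if_pos (by omega : (0 : Int) < n)]
    congr 2
    have : n - 0 + k - 1 = (n - 1) + 1 * k := by ring
    rw [this, Int.add_mul_ediv_right _ _ (ne_of_gt hk), ← hKv]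
    omega
  set codes : List Int := (PySem.List.pyRange 0 n k).map
    (fun i => pvFromBytes (PySem.List.slice (pvBytes cs) (some i) (some (i + k)))) with hcodes
  have hcget : ∀ t (h : t < K + 1), (PySem.List.pyGet? codes ((t : Nat) : Int)).getD 0 =
      pvVal (pvBlk cs k t) := by
    intro t h
    have hmem : codes[t]? = some (pvFromBytes (PySem.List.slice (pvBytes cs)
        (some (0 + k * (t : Int))) (some (0 + k * (t : Int) + k)))) := by
      rw [hcodes, hBrange, List.map_map]
      simp [h]
    rw [PySem.List.pyGet?_natCast, hmem, Option.getD_some,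
      show (0 : Int) + k * (t : Int) = k * (t : Int) from by ring,
      pvSliceBytes, pvFromBytes_val]
    rfl
  -- the filter predicate agrees with the booleans
  have hcfil : ∀ t (h : t < q.length),
      (fun i => decide (¬ (PySem.List.pyGet? codes i).getD 0 =
        (PySem.List.pyGet? codes (i - 1)).getD 0)) (1 + (t : Int)) = !q[t]'(by omega) := by
    intro t h
    rw [hqlen] at h
    have e1 : (1 : Int) + (t : Int) = ((t + 1 : Nat) : Int) := by push_cast; ring
    have e2 : (1 : Int) + (t : Int) - 1 = ((t : Nat) : Int) := by ring
    simp only [e1]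
    rw [show ((t + 1 : Nat) : Int) - 1 = ((t : Nat) : Int) from by push_cast; ring]
    rw [hcget (t + 1) (by omega), hcget t (by omega), hqget t h]
    have hd1 : ∀ c ∈ pvBlk cs k (t + 1), 1 ≤ c.toNat ∧ c.toNat ≤ 255 :=
      fun c hc => hdom c (PySem.List.mem_of_mem_slice cs _ _ hc)
    have hd2 : ∀ c ∈ pvBlk cs k t, 1 ≤ c.toNat ∧ c.toNat ≤ 255 :=
      fun c hc => hdom c (PySem.List.mem_of_mem_slice cs _ _ hc)
    have hiff : (pvVal (pvBlk cs k (t + 1)) = pvVal (pvBlk cs k t)) ↔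
        (pvBlk cs k (t + 1) = pvBlk cs k t) :=
      ⟨fun hv => pvVal_inj _ _ hd1 hd2 hv, fun he => by rw [he]⟩
    simp [hiff]
  have hfilter : (PySem.List.pyRange 1 ((K : Int) + 1) 1).filter
      (fun i => decide (¬ (PySem.List.pyGet? codes i).getD 0 =
        (PySem.List.pyGet? codes (i - 1)).getD 0)) = pvPos q 1 := by
    rw [show (PySem.List.pyRange 1 ((K : Int) + 1) 1) =
      PySem.List.pyRange 1 (1 + ((q.length : Nat) : Int)) 1 from by rw [hqlen, Int.add_comm]]
    exact pvFilter_pos _ q 1 hcfil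
  rw [hA]
  simp only [pvTotalB, ← hcodes, hM]
  rw [hfilter]
  set cuts : List Int := [(0 : Int)] ++ pvPos q 1 ++ [(K : Int) + 1] with hcuts
  have hgaps : pvGaps cuts = pvRuns q := by
    have hgr := pvGaps_runs q 0
    rw [hqlen, show (0 : Int) + 1 = 1 from by ring,
      show (1 : Int) + (K : Int) = (K : Int) + 1 from by ring] at hgr
    rw [hcuts]
    simpa using hgr
  have hcutlen : ((cuts.length : Int)) - 2 = ((pvRuns q).length : Int) - 1 := by
    have h1 : (pvRuns q).length = (pvGaps cuts).length := by rw [hgaps]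
    have h2 : (pvGaps cuts).length = cuts.length - 1 := by
      simp [pvGaps, List.length_zip]
    have h3 : 2 ≤ cuts.length := by simp [hcuts]
    omega
  rw [PySem.List.slice_from_one, pvSumDigits]
  have hgm : (cuts.zip cuts.tail).map (fun p => pvDigitsB (p.2 - p.1)) =
      (pvGaps cuts).map pvDigitsB := by
    rw [pvGaps, List.map_map]
    rfl
  rw [hgm, hgaps, hcutlen, hruns]
  simp only [List.map_cons, List.sum_cons, List.length_cons]
  rw [PySem.List.sum_map_add_int]
  have hconst : ((tl.map (fun _ => k)).sum) = (tl.length : Int) * k := by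
    simp [mul_comm]
  rw [hconst]
  push_cast
  ring

lemma pvCharBounds {s : String} (hd : Dom_solution s) :
    ∀ c ∈ s.toList, 1 ≤ c.toNat ∧ c.toNat ≤ 255 := by
  intro c hc
  have h := List.all_eq_true.mp hd c hc
  simp only [pvDomChar, Bool.or_eq_true, Bool.and_eq_true, decide_eq_true_eq, beq_iff_eq] at h
  omega

-- ===== VERDICT (by name: the statement is the Claim_ definition above) =====
theorem solution_spec : Claim_equal_solution := by
  intro s hd hpre
  simp only [Spec_solution, solution, solution_alt]
  have hlen : 1 ≤ s.toList.length := List.length_pos_of_ne_nil (pvNe_toList hpre)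
  by_cases h1 : ((s.toList.length : Nat) : Int) = 1
  · -- len(s) == 1: A returns 1; B's step range is empty and the default n = 1 is returned
    rw [if_pos h1, h1]
    rw [show PySem.Int.floordiv 1 2 + 1 = 1 from by decide,
      PySem.List.pyRange_one_eq_nil le_rfl]
    simp
  · -- len(s) ≥ 2
    have h1' : 1 ≤ ((s.toList.length : Nat) : Int) := by exact_mod_cast hlen
    have h2 : 2 ≤ ((s.toList.length : Nat) : Int) := by omega
    rw [if_neg h1]
    have hdiv : 1 ≤ PySem.Int.floordiv ((s.toList.length : Nat) : Int) 2 := by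
      rw [PySem.Int.floordiv_eq_ediv_of_pos (by omega)]
      omega
    have hmaps : (PySem.List.pyRange 1
          (PySem.Int.floordiv ((s.toList.length : Nat) : Int) 2 + 1) 1).map
          (pvInnerA s.toList) =
        (PySem.List.pyRange 1
          (PySem.Int.floordiv ((s.toList.length : Nat) : Int) 2 + 1) 1).map
          (pvTotalB (pvBytes s.toList) ((s.toList.length : Nat) : Int)) := by
      refine List.map_congr_left fun step hmem => ?_
      rw [PySem.List.mem_pyRange_one] at hmem
      have hstep : 0 < step := by omega
      have hle : step ≤ PySem.Int.floordiv ((s.toList.length : Nat) : Int) 2 := by omega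
      rw [PySem.Int.floordiv_eq_ediv_of_pos (by omega)] at hle
      have h2s : 2 * step ≤ ((s.toList.length : Nat) : Int) := by
        have := Int.mul_ediv_add_emod ((s.toList.length : Nat) : Int) 2
        have := Int.emod_nonneg ((s.toList.length : Nat) : Int) (by omega : (2 : Int) ≠ 0)
        omega
      rw [pvInner_eq s.toList step hstep h2s,
        pvTotalB_eq s.toList (pvCharBounds hd) step hstep h2s]
    rw [hmaps, PySem.List.pyRange_one_cons (by omega), List.map_cons]
    simp only [List.isEmpty_cons]
    rfl
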